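/- GENERATED by mk_final_copies.py from the proof of the farm's unit `start_decoder.F5d` (farm:start_decoder.F5d.1: Proof.lean) as the
   re-elaboration sweep compiled it — do not edit. -/
import Asan.CheckWalk
import Vorbis.Spec.Reader
import Vorbis.Spec.Units.start_decoder_F5d

open X86 X86.User Asan Vorbis Vorbis.Spec Vorbis.Spec.StartDecoder

set_option maxRecDepth 4000
set_option maxHeartbeats 4000000

namespace Vorbis.Spec.start_decoder_F5d

/-- A byte zero-extended to 32 bits, as a number. -/
theorem f5d_zx8_toNat (x : Nat) (h : x < 256) : (BitVec.zeroExtend 32 (BitVec.ofNat 8 x)).toNat = x := by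
  simp only [BitVec.truncate_eq_setWidth, BitVec.toNat_setWidth, BitVec.toNat_ofNat]
  omega

/-- A byte zero-extended to 32 bits, as a signed number (what `cmp eax, r13d ; jle` compares). -/
theorem f5d_zx8_toInt (x : Nat) (h : x < 256) : (BitVec.zeroExtend 32 (BitVec.ofNat 8 x)).toInt = (x : Int) := by
  have e := f5d_zx8_toNat x h
  rw [BitVec.toInt_eq_toNat_cond, e]
  have h2 : 2 * x < 2 ^ 32 := by omega
  simp only [h2, if_true]

/-- **Segment F5d of `start_decoder`** (`cut220` = `loop22` 0x1156e6 … 0x115712, C lines 4007 – 4008): the checked load of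
`partitions`, the loop test, and on the loop's arm the checked load of `pcl[j]`, its spill to `[R+38H]`, `k = 0`. -/
theorem f5d_walk {Lay : Layout} (hLay : Lay.hi = 0x1000000) {μ : Microarch} (hμ : UserX.MicroOK μ) {u₀ : State}
    (hcode : HasCodeNat Lay u₀ Vorbis.L.start_decoder.entry Vorbis.Code.code_start_decoder.nat Vorbis.L.start_decoder.size)
    (hld1 : Asan.SmallCheck Lay μ Vorbis.WayInv (Vorbis.CodeOK u₀) [.rax, .rdx] 1 Vorbis.L.__asan_load1_noabort.entry)
    {g : Ghost} {i : Nat} {A5 : Arena} {A : Arena × List Obj} {mc : Int} {n P j : Nat} {v : State}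
    (hat : F5Outer u₀ g i A5 A mc n P j v) :
    ReachVia Lay μ WayInv v (fun w => AtF6 u₀ g i w ∨
        F5Inner u₀ g i A5 A mc n P j (Floor1.partition_class_list v.mem (floorAt g v.mem i) j)
          (Floor1.class_dimensions v.mem (floorAt g v.mem i) (Floor1.partition_class_list v.mem (floorAt g v.mem i) j)) 0
          Vorbis.L.start_decoder.cut219 w) := by
  have hb := hat.part.in5
  have hf := hb.loop.frame
  have he := hf.entry
  v_entry he
  obtain ⟨r8, rlo, rhi, ra, flo, fhi, fstack, farena, flog, fc1, fc64, ilt, gdef, blo, bhi, btext, bstack, bdata, blog⟩ := hb.geo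
  have hP31 : P ≤ 31 := by
    rw [← hat.part.parts]
    exact hb.cur.base.FL4
  have hjP := hat.j_le
  have hsite0 := hb.site 0 1 (by omega) (by simp only [voff]; omega)
  have hsitej := hb.site (1 + j) 1 (by omega) (by simp only [voff]; omega)
  -- the three addresses as numbers (the walker sees `UInt64.ofNat R`, not `addr g.R`)
  obtain ⟨R, hR⟩ : ∃ R, R = g.R := ⟨_, rfl⟩
  obtain ⟨f, hfe⟩ : ∃ f, f = g.f := ⟨_, rfl⟩
  obtain ⟨gi, hgi⟩ : ∃ gi, gi = floorAt g v.mem i := ⟨_, rfl⟩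
  have c_rip := hf.rip
  have c_rsp := hf.rsp
  have c_rbp := hb.loop.rbp
  have c_rbx := hb.rbx
  have c_r13 : v.reg .r13 = UInt64.ofNat j := hat.part.r13
  rw [← hR] at c_rsp r8 rlo rhi ra fstack
  rw [← hfe] at c_rbp flo fhi fstack farena flog
  rw [← hgi] at c_rbx gdef hsite0 hsitej
  simp only [addr] at c_rsp c_rbp c_rbx
  have c_eq : Mem.EqOn Vorbis.L.textLo Vorbis.L.textHi u₀.mem v.mem := hf.code
  have hdf : v.flags .df = false := (show abiInv _ from hf.inv).1
  have hmx : v.mxcsr &&& 0x1F80 = 0x1F80 := (show abiInv _ from hf.inv).2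
  have hsse := Vorbis.sseOK_of_abiInv hf.inv
  have hgw : 0x119d40 ≤ gi ∧ gi + 1596 ≤ 0xC00000 ∧ (gi + 1596 ≤ 0x700000 ∨ 0x800000 ≤ gi) := by
    omega
  have hgf : gi + 1596 ≤ f ∨ f + 1808 ≤ gi := by
    omega
  clear fc1 fc64 ilt gdef blo bhi btext bstack bdata blog
  -- the loads of the piece, named before the walk: `partitions`, the literal-0 slot Z24
  have hpar : v.mem.readLE (UInt64.ofNat gi) 1 = P := by
    have h := hat.part.parts
    rw [← hgi] at h
    simp only [vacc, voff, Nat.add_zero] at h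
    exact h
  have hz24 : v.mem.readLE (UInt64.ofNat R + 36) 4 = 0 := by
    have h := hb.loop.mid.consts.z24 (by omega) (by omega)
    rw [← hR] at h
    have ea : addr (R + 0x24) = UInt64.ofNat R + 36 := by
      apply UInt64.toNat_inj.mp
      rw [toNat_addr _ (by omega)]
      u_omega
    unfold Mem.u32 at h
    rw [ea] at h
    exact h
  -- `c = pcl[j]` (a byte; `≤ 15` only when `j < P`, which the branch decides)
  obtain ⟨c, hc⟩ : ∃ c, c = Floor1.partition_class_list v.mem (floorAt g v.mem i) j := ⟨_, rfl⟩
  rw [← hc]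
  have hc256 : c < 256 := by
    rw [hc]
    exact Floor1.partition_class_list_lt _ _ _
  have hpcl : v.mem.readLE (UInt64.ofNat gi + UInt64.ofNat j + 1) 1 = c := by
    have ea : addr (gi + 1 + j) = UInt64.ofNat gi + UInt64.ofNat j + 1 := by
      apply UInt64.toNat_inj.mp
      rw [toNat_addr _ (by omega)]
      u_omega
    rw [hc, ← hgi]
    simp only [vacc, voff]
    unfold Mem.u8
    rw [ea]
  u_walk hcode [hμ.vendor, Vorbis.Spec.cnt32_part j, Vorbis.Spec.cnt32_sext_bv j (by omega)] until [Vorbis.L.start_decoder.cut219, Vorbis.L.start_decoder.cut221] span [Vorbis.L.textLo, Vorbis.L.textHi] side (v_side)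
  case check_1156e9 =>
    -- the byte `partitions` of the element
    have hun : ShadowUntouched v.mem s_1156e9.mem := by v_untouched
    exact Vorbis.Spec.check_site hf.shadow hun hsite0 (by u_omega)
  case check_1156fe =>
    -- the byte `partition_class_list[j]`
    have hun : ShadowUntouched v.mem s_1156fe.mem := by v_untouched
    exact Vorbis.Spec.check_site hf.shadow hun hsitej (by u_omega)
  · -- `partitions ≤ j`: the exit of loop 4007, the segment's exit `AtF6` (0x115714)
    rw [f5d_zx8_toInt P (by omega), Vorbis.Spec.cnt32_toInt j (by omega)] at hbr_1156f4
    have hjeq : j = P := by omega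
    have hun : ShadowUntouched v.mem s_1156f4.mem := by v_untouched
    have hsame : Mem.SameExcept [⟨R - 408, R⟩] v.mem s_1156f4.mem := by
      u_same
    have hws : ∀ w, w ∈ ([⟨R - 408, R⟩] : List Span) → Floor.Win g (floorAt g v.mem i) 1596 1596 w := by
      intro w hw
      simp only [List.mem_cons, List.mem_nil_iff, or_false] at hw
      unfold Floor.Win
      rw [← hR, hw]
      simp only []
      omega
    have hbits : Bits (g.Blk A) g.len s_1156f4.mem g.f := by
      rw [w_mem]
      refine Floor.bits_push hb.loop _ 8 _ ?_ ?_
      · rw [← hR]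
        u_omega
      · u_omega
    have hinv : abiInv s_1156f4 := by
      refine Vorbis.abiInv_of ?_ ?_
      · rw [w_flags]
        simp only [X86.User.df_setStatus]
        exact w_df_1156e9
      · rw [w_mxcsr]
        exact hmx
    have e1 : s_1156f4.reg .rsp = addr g.R := by
      rw [w_rsp, hR]
      rfl
    have e2 : s_1156f4.reg .rbp = addr g.f := by
      rw [w_kept .rbp rfl, c_rbp, hfe]
      rfl
    have e3 : s_1156f4.reg .rbx = addr (floorAt g v.mem i) := by
      rw [w_kept .rbx rfl, c_rbx, hgi]
      rfl
    have e4 : s_1156f4.reg .r13 = addr j := by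
      rw [w_kept .r13 rfl, c_r13]
      rfl
    have hin := hb.keep (pc' := pc_F6) w_rip e1 e2 e3 hinv w_eq hsame hws (by omega) (Nat.le_refl _) (Nat.le_refl _) hun hbits
    obtain ⟨hs, hg⟩ := hb.elem_same hsame hws
    obtain ⟨eG, _, _, _⟩ := Floor.fields_same hb.geo hsame hws (Nat.le_refl _)
    have hpart := hat.part.keep_same hin hs hg eG e4
    have hjP' : j ≤ Floor1.partitions v.mem (floorAt g v.mem i) := by
      rw [hat.part.parts]
      exact hjP
    have hsum := hb.dimSum_le hjP'
    obtain ⟨hv', hx'⟩ := F5.vals_same hs hg (by omega) (by omega) hat.values hat.xl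
    have hds : Floor1.dimSum s_1156f4.mem (floorAt g v.mem i) j = Floor1.dimSum v.mem (floorAt g v.mem i) j :=
      Floor1.same_dimSum hs hg j (by omega)
    refine ReachVia.done (Or.inl ⟨A5, A, mc, n, hin.loop, hin.rbx, hin.cur, hpart.FL7, ?_, ?_⟩)
    · -- FL8: `values = 2 + Σ_{j' < partitions} …`, with `partitions = P = j`
      rw [hpart.parts, ← hjeq, eG, hds, hv']
      omega
    · -- XL
      rw [eG]
      exact XL.of_upTo hx' (by rw [hv']; omega)
  · -- `j < partitions`: `c = pcl[j]` spilled to `[R+38H]`, `k = 0`; the head of loop 4009 (0x1156c8)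
    rw [f5d_zx8_toInt P (by omega), Vorbis.Spec.cnt32_toInt j (by omega)] at hbr_1156f4
    have hjlt : j < P := by omega
    have hjlt' : j < Floor1.partitions v.mem (floorAt g v.mem i) := by
      rw [hat.part.parts]
      exact hjlt
    obtain ⟨hc15, hd1, hd8⟩ := hb.class_dim hjlt'
    rw [← hc] at hc15 hd1 hd8
    have hun : ShadowUntouched v.mem s_115712.mem := by v_untouched
    have hsame : Mem.SameExcept [⟨R - 408, R⟩, ⟨R + 0x38, R + 0x3c⟩] v.mem s_115712.mem := by
      u_same
    have hws : ∀ w, w ∈ ([⟨R - 408, R⟩, ⟨R + 0x38, R + 0x3c⟩] : List Span) →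
        Floor.Win g (floorAt g v.mem i) 1596 1596 w := by
      intro w hw
      simp only [List.mem_cons, List.mem_nil_iff, or_false] at hw
      unfold Floor.Win
      rw [← hR]
      rcases hw with rfl | rfl
      all_goals simp only []
      all_goals omega
    have hq : ∀ w, w ∈ ([⟨R - 408, R⟩, ⟨R + 0x38, R + 0x3c⟩] : List Span) →
        Floor.Quiet g (floorAt g v.mem i) 1596 1596 w := by
      intro w hw
      simp only [List.mem_cons, List.mem_nil_iff, or_false] at hw
      unfold Floor.Quiet
      rw [← hR]
      rcases hw with rfl | rfl
      all_goals simp only []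
      all_goals omega
    have hbits : Bits (g.Blk A) g.len s_115712.mem g.f :=
      Floor.bits_quiet hb.geo hb.loop.mid.bits hsame hq (Nat.le_refl _)
    have hinv : abiInv s_115712 := by
      refine Vorbis.abiInv_of ?_ ?_
      · rw [w_flags]
        exact w_df_1156fe
      · rw [w_mxcsr]
        exact hmx
    have e1 : s_115712.reg .rsp = addr g.R := by
      rw [w_rsp, hR]
      rfl
    have e2 : s_115712.reg .rbp = addr g.f := by
      rw [w_kept .rbp rfl, c_rbp, hfe]
      rfl
    have e3 : s_115712.reg .rbx = addr (floorAt g v.mem i) := by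
      rw [w_kept .rbx rfl, c_rbx, hgi]
      rfl
    have e4 : s_115712.reg .r13 = addr j := by
      rw [w_kept .r13 rfl, c_r13]
      rfl
    have hin := hb.keep w_rip e1 e2 e3 hinv w_eq hsame hws (by omega) (Nat.le_refl _) (Nat.le_refl _) hun hbits
    obtain ⟨hs, hg⟩ := hb.elem_same hsame hws
    obtain ⟨eG, _, _, _⟩ := Floor.fields_same hb.geo hsame hws (Nat.le_refl _)
    have hpart := hat.part.keep_same hin hs hg eG e4
    have hsum := hb.dimSum_le (Nat.le_of_lt hjlt')
    obtain ⟨hv', hx'⟩ := F5.vals_same hs hg (by omega) (by omega) hat.values hat.xl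
    have hds : Floor1.dimSum s_115712.mem (floorAt g v.mem i) j = Floor1.dimSum v.mem (floorAt g v.mem i) j :=
      Floor1.same_dimSum hs hg j (by omega)
    -- the spilled class, read back
    have hslot : StartDecoder.slot g s_115712.mem 0x38 = c := by
      have ea : addr (R + 0x38) = UInt64.ofNat R + 56 := by
        apply UInt64.toNat_inj.mp
        rw [toNat_addr _ (by omega)]
        u_omega
      unfold StartDecoder.slot Mem.u32
      rw [← hR, ea, w_mem, Mem.readLE_writeLE_same _ _ 4 _ (by decide), f5d_zx8_toNat c hc256]
      omega
    refine ReachVia.done (Or.inr ⟨hpart, hjlt, hslot, ?_, hc15, ?_, hd8, ?_, Nat.zero_le _, ?_, ?_⟩)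
    · rw [eG, Floor1.same_partition_class_list hs hg j (by omega)]
      exact hc.symm
    · rw [eG, Floor1.same_class_dimensions hs hg c (by omega)]
    · rw [w_r15]
      rfl
    · rw [eG, hds, Nat.add_zero]
      exact hv'
    · rw [eG, hds, Nat.add_zero]
      exact hx'

end Vorbis.Spec.start_decoder_F5d

/-- Unit `start_decoder.F5d`: `f5d_walk` at every entry state. -/
theorem Vorbis.Spec.Worked.start_decoder_F5d_ok : Vorbis.Spec.start_decoder_F5d.Statement := by
  intro Lay hLay μ hμ u₀ hcode hld1 g i A5 A mc n P j v hat
  exact Vorbis.Spec.start_decoder_F5d.f5d_walk hLay hμ hcode hld1 hat
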